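-- pv_equiv track=rewrite | github.com/kupulau/Algorithm | 백준/Silver/31926. 밤양갱/밤양갱.py | bamyanggang
-- ===== SOURCE A (Python) =====
-- def bamyanggang(n):
--     if n == 1:
--         return 10
--     else:
--         repeat = 1
--         cnt = 0
--         while repeat < n+1:
--             cnt += 1
--             repeat *= 2
--         return cnt + 9     # first daldidalgo (8) + final n (1)
-- ===== SOURCE B (Python) =====
-- def bamyanggang(n):
--     return max(n, 0).bit_length() + 9
-- ===== Notes on version B (the rewrite author's own statement) =====
-- stated objective: simpler
-- what changed: Replaced the n==1 special case and the doubling while-loop with a single closed-form return max(n,0).bit_length() + 9.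
import Mathlib
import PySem

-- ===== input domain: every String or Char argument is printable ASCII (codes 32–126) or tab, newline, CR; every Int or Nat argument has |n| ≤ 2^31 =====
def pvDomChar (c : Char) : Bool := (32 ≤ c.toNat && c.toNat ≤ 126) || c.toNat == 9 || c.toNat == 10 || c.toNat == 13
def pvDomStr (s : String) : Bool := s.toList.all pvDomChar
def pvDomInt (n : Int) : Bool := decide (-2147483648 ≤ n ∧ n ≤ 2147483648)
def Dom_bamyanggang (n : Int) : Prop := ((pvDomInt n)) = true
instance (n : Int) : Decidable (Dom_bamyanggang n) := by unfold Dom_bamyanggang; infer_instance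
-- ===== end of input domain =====

-- B replaces the special case and the doubling loop with the closed form max(n,0).bit_length() + 9 (simpler).

-- ===== PORT A =====
-- the while-loop of A: while repeat < n+1: cnt += 1; repeat *= 2
def bamyanggangLoop (n rep cnt : Int) (h : 0 < rep) : Int :=
  if rep < n + 1 then bamyanggangLoop n (rep * 2) (cnt + 1) (by omega) else cnt
termination_by (n + 1 - rep).toNat
decreasing_by omega

def bamyanggang (n : Int) : Int :=
  if n = 1 then 10 else bamyanggangLoop n 1 0 (by omega) + 9

-- ===== PORT B =====
-- max(n,0).bit_length() + 9 ; Python's int.bit_length on a nonnegative value is Nat.size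
def bamyanggang_alt (n : Int) : Int := ((max n 0).toNat.size : Int) + 9

-- ===== PRECONDITION & SPEC =====
def Spec_bamyanggang (n : Int) (out : Int) : Prop := out = bamyanggang_alt n
instance (n : Int) (out : Int) : Decidable (Spec_bamyanggang n out) := by unfold Spec_bamyanggang; infer_instance

-- ===== CLAIM (what is proved, stated in full; the proofs are below) =====
def Claim_equal_bamyanggang : Prop := ∀ (n : Int), Dom_bamyanggang n → Spec_bamyanggang n (bamyanggang n)

-- ===== LEMMAS AND PROOFS =====

-- The loop started at rep = 2^c (with 2^c still < n+1) computes the bit length of n.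
lemma bamyanggangLoop_size (n : Int) :
    ∀ k (c : Nat) (rep : Int) (h : 0 < rep), rep = 2 ^ c → (n + 1 - rep).toNat ≤ k →
      rep < n + 1 →
      bamyanggangLoop n rep (c : Int) h = ((Int.toNat n).size : Int) := by
  intro k
  induction k with
  | zero => intro c rep h hrep hk hlt; omega
  | succ k ih =>
    intro c rep h hrep hk hlt
    rw [bamyanggangLoop, if_pos hlt]
    have h2 : rep * 2 = 2 ^ (c + 1) := by rw [hrep]; ring
    by_cases hlt' : (2:Int) ^ (c + 1) < n + 1
    · have hc : ((c : Int) + 1) = ((c + 1 : Nat) : Int) := by push_cast; ring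
      rw [hc]
      exact ih (c + 1) (rep * 2) (by omega) h2 (by omega) (by omega)
    · rw [bamyanggangLoop, if_neg (by omega)]
      -- here 2^c ≤ n < 2^(c+1), so size n.toNat = c+1
      have hub : n.toNat < 2 ^ (c + 1) := by
        have h1 : ((2:Int) ^ (c+1)) = ((2 ^ (c+1) : Nat) : Int) := by push_cast; ring
        rw [h1] at hlt'; omega
      have hlb : 2 ^ c ≤ n.toNat := by
        have h1 : ((2:Int) ^ c) = ((2 ^ c : Nat) : Int) := by push_cast; ring
        rw [hrep, h1] at hlt; omega
      have hs1 : n.toNat.size ≤ c + 1 := Nat.size_le.mpr hub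
      have hs2 : ¬ n.toNat.size ≤ c := fun hle => absurd (Nat.size_le.mp hle) (Nat.not_lt.mpr hlb)
      omega

theorem bamyanggang_spec : Claim_equal_bamyanggang := by
  intro n _
  unfold Spec_bamyanggang bamyanggang bamyanggang_alt
  by_cases h1 : n = 1
  · subst h1; decide
  · rw [if_neg h1]
    by_cases hpos : 1 ≤ n
    · have hm : max n 0 = n := by omega
      have := bamyanggangLoop_size n ((n + 1 - 1).toNat) 0 1 (by omega) (by norm_num)
        (le_refl _) (by omega)
      rw [hm]
      push_cast at this ⊢
      omega
    · rw [bamyanggangLoop, if_neg (by omega)]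
      have hm : max n 0 = 0 := by omega
      rw [hm]
      simp [Nat.size]
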